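-- pv_equiv track=rewrite | github.com/Security-Phoenix-demo/Utils | Loading_Script_V5_PUB/scripts/generate_yaml_mappings.py | detect_scanner_type
-- ===== SOURCE A (Python) =====
-- from typing import Dict, Any, List, Tuple
--
-- def detect_scanner_type(scanner_name: str, sample_data: Dict) -> str:
--     """Detect appropriate asset type based on scanner name and data"""
--     scanner_lower = scanner_name.lower()
--
--     # Container scanners
--     if any(x in scanner_lower for x in ['docker', 'container', 'image', 'harbor', 'trivy', 'grype', 'aqua', 'twistlock', 'clair', 'anchore']):
--         return "CONTAINER"
--
--     # Code/SAST scanners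
--     if any(x in scanner_lower for x in ['sast', 'code', 'sonar', 'checkmarx', 'fortify', 'bandit', 'semgrep', 'eslint', 'pmd', 'spotbugs']):
--         return "CODE"
--
--     # Infrastructure scanners
--     if any(x in scanner_lower for x in ['nmap', 'nessus', 'openvas', 'qualys', 'tenable', 'nexpose']):
--         return "INFRA"
--
--     # Web app scanners
--     if any(x in scanner_lower for x in ['burp', 'zap', 'arachni', 'acunetix', 'netsparker', 'appspider', 'wapiti']):
--         return "WEB"
--
--     # Cloud/IaC scanners
--     if any(x in scanner_lower for x in ['cloud', 'aws', 'azure', 'gcp', 'terraform', 'checkov', 'tfsec', 'terrascan', 'prowler', 'scout']):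
--         return "CLOUD"
--
--     # Dependency/SCA scanners
--     if any(x in scanner_lower for x in ['npm', 'yarn', 'pip', 'maven', 'gradle', 'audit', 'dependency', 'snyk', 'whitesource', 'blackduck']):
--         return "CODE"
--
--     # Repository scanners
--     if any(x in scanner_lower for x in ['git', 'repo', 'github', 'gitlab']):
--         return "REPOSITORY"
--
--     # Build scanners
--     if any(x in scanner_lower for x in ['build', 'ci', 'jfrog', 'xray', 'artifactory']):
--         return "BUILD"
--
--     # Default
--     return "INFRA"
-- ===== SOURCE B (Python) =====
-- # Collect-and-minimize re-implementation: flatten groups to one prioritized keyword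
-- # list, gather ALL matching keywords' (priority, category) pairs, return the category
-- # of the minimum priority (no short-circuit chain); default "INFRA".
-- _GROUPS = [
--     (('docker', 'container', 'image', 'harbor', 'trivy', 'grype', 'aqua', 'twistlock', 'clair', 'anchore'), "CONTAINER"),
--     (('sast', 'code', 'sonar', 'checkmarx', 'fortify', 'bandit', 'semgrep', 'eslint', 'pmd', 'spotbugs'), "CODE"),
--     (('nmap', 'nessus', 'openvas', 'qualys', 'tenable', 'nexpose'), "INFRA"),
--     (('burp', 'zap', 'arachni', 'acunetix', 'netsparker', 'appspider', 'wapiti'), "WEB"),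
--     (('cloud', 'aws', 'azure', 'gcp', 'terraform', 'checkov', 'tfsec', 'terrascan', 'prowler', 'scout'), "CLOUD"),
--     (('npm', 'yarn', 'pip', 'maven', 'gradle', 'audit', 'dependency', 'snyk', 'whitesource', 'blackduck'), "CODE"),
--     (('git', 'repo', 'github', 'gitlab'), "REPOSITORY"),
--     (('build', 'ci', 'jfrog', 'xray', 'artifactory'), "BUILD"),
-- ]
--
-- # one flat prioritized keyword table: (keyword, priority, category)
-- _KEYWORDS = [(kw, prio, cat) for prio, (kws, cat) in enumerate(_GROUPS) for kw in kws]
--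
-- def detect_scanner_type(scanner_name: str, sample_data) -> str:
--     low = scanner_name.lower()
--     matches = [(prio, cat) for kw, prio, cat in _KEYWORDS if kw in low]
--     if not matches:
--         return "INFRA"
--     return min(matches, key=lambda t: t[0])[1]
-- ===== Notes on version B (the rewrite author's own statement) =====
-- stated objective: alternative
-- what changed: Instead of A's short-circuiting if-chain of group tests, B flattens all keywords into one prioritized list, collects every matching keyword's (priority, category) pair in a single pass, and returns the category of the minimum priority (default INFRA); correctness rests on min-priority = first matching group.
import Mathlib
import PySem

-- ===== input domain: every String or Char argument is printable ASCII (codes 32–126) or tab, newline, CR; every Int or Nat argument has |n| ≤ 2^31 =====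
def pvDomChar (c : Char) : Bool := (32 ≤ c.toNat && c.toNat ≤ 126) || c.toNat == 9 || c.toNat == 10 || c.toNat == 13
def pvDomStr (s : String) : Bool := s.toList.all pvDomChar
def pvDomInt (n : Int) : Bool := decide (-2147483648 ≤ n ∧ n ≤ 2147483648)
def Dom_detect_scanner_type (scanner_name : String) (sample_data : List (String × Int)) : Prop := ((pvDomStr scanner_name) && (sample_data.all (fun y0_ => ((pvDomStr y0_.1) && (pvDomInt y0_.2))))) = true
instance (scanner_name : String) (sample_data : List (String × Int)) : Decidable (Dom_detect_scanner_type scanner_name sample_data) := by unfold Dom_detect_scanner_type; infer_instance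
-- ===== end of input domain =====

-- B flattens the keyword groups into one prioritized list, collects all matches in a single pass and returns the category of minimum priority (alternative algorithm; same cost).


-- ===== PORT A =====
def detect_scanner_type (scanner_name : String) (sample_data : List (String × Int)) : String :=
  let scanner_lower := PySem.Str.lower scanner_name
  if ["docker", "container", "image", "harbor", "trivy", "grype", "aqua", "twistlock", "clair", "anchore"].any (fun x => PySem.Str.isIn x scanner_lower) then "CONTAINER"
  else if ["sast", "code", "sonar", "checkmarx", "fortify", "bandit", "semgrep", "eslint", "pmd", "spotbugs"].any (fun x => PySem.Str.isIn x scanner_lower) then "CODE"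
  else if ["nmap", "nessus", "openvas", "qualys", "tenable", "nexpose"].any (fun x => PySem.Str.isIn x scanner_lower) then "INFRA"
  else if ["burp", "zap", "arachni", "acunetix", "netsparker", "appspider", "wapiti"].any (fun x => PySem.Str.isIn x scanner_lower) then "WEB"
  else if ["cloud", "aws", "azure", "gcp", "terraform", "checkov", "tfsec", "terrascan", "prowler", "scout"].any (fun x => PySem.Str.isIn x scanner_lower) then "CLOUD"
  else if ["npm", "yarn", "pip", "maven", "gradle", "audit", "dependency", "snyk", "whitesource", "blackduck"].any (fun x => PySem.Str.isIn x scanner_lower) then "CODE"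
  else if ["git", "repo", "github", "gitlab"].any (fun x => PySem.Str.isIn x scanner_lower) then "REPOSITORY"
  else if ["build", "ci", "jfrog", "xray", "artifactory"].any (fun x => PySem.Str.isIn x scanner_lower) then "BUILD"
  else "INFRA"

-- ===== PORT B =====
-- B-side: the grouped table (Source B's _GROUPS)
def dstGroups : List (List String × String) :=
  [ (["docker", "container", "image", "harbor", "trivy", "grype", "aqua", "twistlock", "clair", "anchore"], "CONTAINER"),
    (["sast", "code", "sonar", "checkmarx", "fortify", "bandit", "semgrep", "eslint", "pmd", "spotbugs"], "CODE"),
    (["nmap", "nessus", "openvas", "qualys", "tenable", "nexpose"], "INFRA"),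
    (["burp", "zap", "arachni", "acunetix", "netsparker", "appspider", "wapiti"], "WEB"),
    (["cloud", "aws", "azure", "gcp", "terraform", "checkov", "tfsec", "terrascan", "prowler", "scout"], "CLOUD"),
    (["npm", "yarn", "pip", "maven", "gradle", "audit", "dependency", "snyk", "whitesource", "blackduck"], "CODE"),
    (["git", "repo", "github", "gitlab"], "REPOSITORY"),
    (["build", "ci", "jfrog", "xray", "artifactory"], "BUILD") ]

-- Source B's _KEYWORDS comprehension: flatten the enumerated groups to (keyword, priority, category)
def dstFlatten (n : Int) : List (List String × String) → List (String × Int × String)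
  | [] => []
  | (kws, cat) :: rest => kws.map (fun k => (k, n, cat)) ++ dstFlatten (n + 1) rest

def dstKeywords : List (String × Int × String) := dstFlatten 0 dstGroups

def detect_scanner_type_alt (scanner_name : String) (sample_data : List (String × Int)) : String :=
  let low := PySem.Str.lower scanner_name
  let ms := (dstKeywords.filter (fun t => PySem.Str.isIn t.1 low)).map (fun t => t.2)
  match ms with
  | [] => "INFRA"
  | m :: ms => (ms.foldl (fun acc x => if x.1 < acc.1 then x else acc) m).2  -- Python min(..., key=t[0]): first element with minimal priority

-- ===== PRECONDITION & SPEC =====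
def Spec_detect_scanner_type (scanner_name : String) (sample_data : List (String × Int)) (out : String) : Prop := out = detect_scanner_type_alt scanner_name sample_data
instance (scanner_name : String) (sample_data : List (String × Int)) (out : String) : Decidable (Spec_detect_scanner_type scanner_name sample_data out) := by unfold Spec_detect_scanner_type; infer_instance

-- ===== CLAIM (what is proved, stated in full; the proofs are below) =====
def Claim_equal_detect_scanner_type : Prop := ∀ (scanner_name : String) (sample_data : List (String × Int)), Dom_detect_scanner_type scanner_name sample_data → Spec_detect_scanner_type scanner_name sample_data (detect_scanner_type scanner_name sample_data)

-- ===== LEMMAS AND PROOFS =====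

-- A's if-chain, abstractly: first group whose keywords match, default "INFRA"
def dstChain (f : String → Bool) : List (List String × String) → String
  | [] => "INFRA"
  | (kws, cat) :: rest => if kws.any f then cat else dstChain f rest

-- B's selection step
def dstSel (l : List (Int × String)) : String :=
  match l with
  | [] => "INFRA"
  | m :: ms => (ms.foldl (fun acc x => if x.1 < acc.1 then x else acc) m).2

lemma dstFlatten_ge (t : List (List String × String)) : ∀ (n : Int), ∀ x ∈ dstFlatten n t, n ≤ x.2.1 := by
  induction t with
  | nil => intro n x hx; simp [dstFlatten] at hx
  | cons g rest ih =>
    intro n x hx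
    obtain ⟨kws, cat⟩ := g
    simp only [dstFlatten, List.mem_append, List.mem_map] at hx
    rcases hx with ⟨k, _, rfl⟩ | hx
    · simp
    · have := ih (n + 1) x hx; omega

lemma dst_fold_stay (n : Int) (acc : Int × String) (h : acc.1 = n) :
    ∀ (l : List (Int × String)), (∀ x ∈ l, n ≤ x.1) →
      l.foldl (fun acc x => if x.1 < acc.1 then x else acc) acc = acc := by
  intro l
  induction l with
  | nil => intro; rfl
  | cons y ys ih =>
    intro hl
    have hy : n ≤ y.1 := hl y (by simp)
    have : ¬ y.1 < acc.1 := by omega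
    simp only [List.foldl_cons, if_neg this]
    exact ih (fun x hx => hl x (by simp [hx]))

lemma dst_main (f : String → Bool) (t : List (List String × String)) : ∀ (n : Int),
    dstSel (((dstFlatten n t).filter (fun x => f x.1)).map (fun x => x.2)) = dstChain f t := by
  induction t with
  | nil => intro n; rfl
  | cons g rest ih =>
    intro n
    obtain ⟨kws, cat⟩ := g
    have hmapfilter : ((kws.map (fun k => (k, n, cat))).filter (fun x : String × Int × String => f x.1))
        = (kws.filter f).map (fun k => (k, n, cat)) := by
      simp [List.filter_map, Function.comp_def]
    simp only [dstFlatten, List.filter_append, List.map_append, hmapfilter, dstChain]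
    by_cases h : kws.any f
    · simp only [h, if_true]
      obtain ⟨k0, ks, hks⟩ : ∃ k0 ks, kws.filter f = k0 :: ks := by
        rcases hfe : kws.filter f with _ | ⟨k0, ks⟩
        · rw [List.filter_eq_nil_iff] at hfe
          rw [List.any_eq_true] at h
          obtain ⟨a, ha, hfa⟩ := h
          exact absurd hfa (by simpa using hfe a ha)
        · exact ⟨k0, ks, rfl⟩
      rw [hks]
      simp only [List.map_cons, List.map_map, List.cons_append, dstSel]
      have hge : ∀ x ∈ (ks.map ((fun x : String × Int × String => x.2) ∘ fun k => (k, n, cat)))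
          ++ ((dstFlatten (n + 1) rest).filter (fun x => f x.1)).map (fun x => x.2), n ≤ x.1 := by
        intro x hx
        rcases List.mem_append.mp hx with hx | hx
        · obtain ⟨k, _, rfl⟩ := List.mem_map.mp hx; simp
        · obtain ⟨y, hy, rfl⟩ := List.mem_map.mp hx
          have := dstFlatten_ge rest (n + 1) y (List.mem_of_mem_filter hy)
          omega
      rw [dst_fold_stay n ((fun x : String × Int × String => x.2) ((fun k => (k, n, cat)) k0)) rfl _ hge]
    · have hfe : kws.filter f = [] := by
        rw [List.filter_eq_nil_iff]
        intro a ha hfa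
        exact h (List.any_eq_true.mpr ⟨a, ha, hfa⟩)
      simp only [h, Bool.false_eq_true, if_false, hfe, List.map_nil, List.nil_append]
      exact ih (n + 1)

-- ===== VERDICT (by name: the statement is the Claim_ definition above) =====
theorem detect_scanner_type_spec : Claim_equal_detect_scanner_type := by
  intro scanner_name sample_data _
  unfold Spec_detect_scanner_type detect_scanner_type detect_scanner_type_alt
  have hB := dst_main (fun k => PySem.Str.isIn k (PySem.Str.lower scanner_name)) dstGroups 0
  simp only [dstChain, dstGroups] at hB
  rw [show dstKeywords = dstFlatten 0 dstGroups from rfl]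
  exact hB.symm
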